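-- pv_equiv track=rewrite | github.com/agnel18/anki-fluent-forever-language-card-generator | languages/korean/domain/ko_validator.py | _has_valid_korean_patterns
-- ===== SOURCE A (Python) =====
-- from typing import Dict, Any, List
--
-- def _has_valid_korean_patterns(word_explanations: List[List[Any]]) -> bool:
--     """Check if result has valid Korean grammar patterns."""
--     roles = [item[1] for item in word_explanations if len(item) > 1]
--
--     # Korean sentences typically end with a verb, adjective, or copula
--     has_predicate = any(
--         role in ['verb', 'copula', 'auxiliary_verb', 'adjective',
--                  'descriptive_verb', 'honorific_verb', 'humble_verb']
--         for role in roles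
--     )
--
--     # Most sentences have at least one particle
--     has_particle = any(
--         role in ['particle', 'topic_marker', 'subject_marker', 'object_marker',
--                  'locative_particle', 'possessive_particle', 'instrumental_particle',
--                  'comitative_particle', 'honorific_particle']
--         for role in roles
--     )
--
--     # Must have at least one content word
--     has_content = any(
--         role in ['noun', 'verb', 'adjective', 'pronoun']
--         for role in roles
--     )
--
--     return has_content and (has_predicate or has_particle)
-- ===== SOURCE B (Python) =====
-- PRED = frozenset(['verb', 'copula', 'auxiliary_verb', 'adjective',
--                   'descriptive_verb', 'honorific_verb', 'humble_verb'])
-- PART = frozenset(['particle', 'topic_marker', 'subject_marker', 'object_marker',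
--                   'locative_particle', 'possessive_particle', 'instrumental_particle',
--                   'comitative_particle', 'honorific_particle'])
-- CONT = frozenset(['noun', 'verb', 'adjective', 'pronoun'])
--
-- def _has_valid_korean_patterns(word_explanations):
--     """Single pass over word_explanations maintaining three flags, with early exit."""
--     hp = hpa = hc = False
--     for item in word_explanations:
--         if hp and hpa and hc:
--             break
--         if len(item) > 1:
--             role = item[1]
--             hp = hp or role in PRED
--             hpa = hpa or role in PART
--             hc = hc or role in CONT
--     return hc and (hp or hpa)
-- ===== Notes on version B (the rewrite author's own statement) =====
-- stated objective: alternative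
-- what changed: Replaces A's build-a-roles-list-then-three-separate-any-scans with a single pass over word_explanations that maintains three booleans and breaks early once all are set.
import Mathlib
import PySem

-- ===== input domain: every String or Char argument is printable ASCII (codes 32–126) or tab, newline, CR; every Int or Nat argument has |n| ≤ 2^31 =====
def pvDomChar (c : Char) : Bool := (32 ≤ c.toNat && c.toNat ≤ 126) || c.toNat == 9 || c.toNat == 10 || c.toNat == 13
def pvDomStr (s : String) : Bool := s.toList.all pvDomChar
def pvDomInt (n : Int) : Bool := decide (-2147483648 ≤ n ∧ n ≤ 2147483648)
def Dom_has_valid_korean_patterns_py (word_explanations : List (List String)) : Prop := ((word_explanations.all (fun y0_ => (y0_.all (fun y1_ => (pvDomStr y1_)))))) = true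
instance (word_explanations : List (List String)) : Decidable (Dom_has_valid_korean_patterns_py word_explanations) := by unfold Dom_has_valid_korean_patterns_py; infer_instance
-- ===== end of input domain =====

-- B replaces A's build-roles-list-then-three-any-scans with one pass keeping three flags (early exit); alternative decomposition, same cost.

-- ===== PORT A =====
def pvPredList : List String := ["verb", "copula", "auxiliary_verb", "adjective",
  "descriptive_verb", "honorific_verb", "humble_verb"]
def pvPartList : List String := ["particle", "topic_marker", "subject_marker", "object_marker",
  "locative_particle", "possessive_particle", "instrumental_particle",
  "comitative_particle", "honorific_particle"]
def pvContList : List String := ["noun", "verb", "adjective", "pronoun"]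

def has_valid_korean_patterns_py (word_explanations : List (List String)) : Bool :=
  let roles := (word_explanations.filter (fun item => item.length > 1)).map
    (fun item => item.getD 1 "")   -- item[1]; in range since len(item) > 1
  let has_predicate := roles.any (fun role => pvPredList.contains role)
  let has_particle := roles.any (fun role => pvPartList.contains role)
  let has_content := roles.any (fun role => pvContList.contains role)
  has_content && (has_predicate || has_particle)

-- ===== PORT B =====
-- the loop of Source B: three flags, early break once all are set
def pvAltGo : List (List String) → Bool → Bool → Bool → Bool
  | [], hp, hpa, hc => hc && (hp || hpa)
  | item :: rest, hp, hpa, hc =>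
    if hp && hpa && hc then hc && (hp || hpa)
    else if item.length > 1 then
      let role := item.getD 1 ""
      pvAltGo rest (hp || pvPredList.contains role) (hpa || pvPartList.contains role)
        (hc || pvContList.contains role)
    else pvAltGo rest hp hpa hc

def has_valid_korean_patterns_py_alt (word_explanations : List (List String)) : Bool :=
  pvAltGo word_explanations false false false

-- ===== PRECONDITION & SPEC =====
def Spec_has_valid_korean_patterns_py (word_explanations : List (List String)) (out : Bool) : Prop := out = has_valid_korean_patterns_py_alt word_explanations
instance (word_explanations : List (List String)) (out : Bool) : Decidable (Spec_has_valid_korean_patterns_py word_explanations out) := by unfold Spec_has_valid_korean_patterns_py; infer_instance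

-- ===== CLAIM (what is proved, stated in full; the proofs are below) =====
def Claim_equal_has_valid_korean_patterns_py : Prop := ∀ (word_explanations : List (List String)), Dom_has_valid_korean_patterns_py word_explanations → Spec_has_valid_korean_patterns_py word_explanations (has_valid_korean_patterns_py word_explanations)

-- ===== LEMMAS AND PROOFS =====

def pvAnyRole (ws : List (List String)) (cat : List String) : Bool :=
  ((ws.filter (fun item => item.length > 1)).map (fun item => item.getD 1 "")).any
    (fun role => cat.contains role)

theorem pvAltGo_eq (ws : List (List String)) : ∀ (hp hpa hc : Bool),
    pvAltGo ws hp hpa hc =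
      ((hc || pvAnyRole ws pvContList) &&
        ((hp || pvAnyRole ws pvPredList) || (hpa || pvAnyRole ws pvPartList))) := by
  induction ws with
  | nil => intro hp hpa hc; simp [pvAltGo, pvAnyRole]
  | cons item rest ih =>
    intro hp hpa hc
    by_cases hbrk : (hp && hpa && hc) = true
    · simp only [Bool.and_eq_true] at hbrk
      obtain ⟨⟨h1, h2⟩, h3⟩ := hbrk
      subst h1; subst h2; subst h3
      simp [pvAltGo]
    · by_cases hlen : item.length > 1
      · simp only [pvAltGo, hbrk, hlen, if_true, ih,
          pvAnyRole, List.filter_cons, decide_eq_true_eq, List.map_cons, List.any_cons]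
        simp [hlen, Bool.or_assoc]
      · simp only [pvAltGo, hbrk, if_false, hlen, if_false, ih,
          pvAnyRole, List.filter_cons, decide_eq_true_eq]
        simp

-- ===== VERDICT (by name: the statement is the Claim_ definition above) =====
theorem has_valid_korean_patterns_py_spec : Claim_equal_has_valid_korean_patterns_py := by
  intro ws _
  unfold Spec_has_valid_korean_patterns_py has_valid_korean_patterns_py has_valid_korean_patterns_py_alt
  rw [pvAltGo_eq]
  simp [pvAnyRole, Bool.or_comm]
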